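-- pv_equiv track=rewrite | github.com/openpaperdatasetcode/MethodRelocationRefactoringEngineTesting | SkeletonGeneration/perConditionSelectFeature.py | contains_non_static_inner_classes
-- ===== SOURCE A (Python) =====
-- from typing import List, Dict, Any
--
-- def contains_non_static_inner_classes(item: Dict[str, Any]) -> bool:
--     """
--     检查方法体是否包含非静态内部类
--     """
--     try:
--         method = item.get("method", {})
--         features = method.get("features", [])
--
--         # 检查特征中是否包含内部类相关的关键字
--         inner_class_indicators = ["inner class", "non-static inner", "member inner class"]
--         for feature in features:
--             if isinstance(feature, str):
--                 feature_lower = feature.lower()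
--                 for indicator in inner_class_indicators:
--                     if indicator in feature_lower:
--                         return True
--         return False
--     except:
--         return False
-- ===== SOURCE B (Python) =====
-- def contains_non_static_inner_classes(item):
--     """
--     Flatten all string features (lowercased) into one newline-joined blob and
--     run just two substring searches on it ("member inner class" already
--     contains "inner class", so two indicators suffice).
--     """
--     try:
--         features = item.get("method", {}).get("features", [])
--         blob = "\n".join(f.lower() for f in features if isinstance(f, str))
--         return "inner class" in blob or "non-static inner" in blob
--     except:
--         return False
-- ===== Notes on version B (the rewrite author's own statement) =====
-- stated objective: alternative
-- what changed: Instead of A's nested loops (each feature lowercased and scanned for each of three indicators with early return), B joins all lowercased features into one newline-separated blob and performs exactly two substring searches on it, dropping the redundant third indicator ('member inner class' already contains 'inner class').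
import Mathlib
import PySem

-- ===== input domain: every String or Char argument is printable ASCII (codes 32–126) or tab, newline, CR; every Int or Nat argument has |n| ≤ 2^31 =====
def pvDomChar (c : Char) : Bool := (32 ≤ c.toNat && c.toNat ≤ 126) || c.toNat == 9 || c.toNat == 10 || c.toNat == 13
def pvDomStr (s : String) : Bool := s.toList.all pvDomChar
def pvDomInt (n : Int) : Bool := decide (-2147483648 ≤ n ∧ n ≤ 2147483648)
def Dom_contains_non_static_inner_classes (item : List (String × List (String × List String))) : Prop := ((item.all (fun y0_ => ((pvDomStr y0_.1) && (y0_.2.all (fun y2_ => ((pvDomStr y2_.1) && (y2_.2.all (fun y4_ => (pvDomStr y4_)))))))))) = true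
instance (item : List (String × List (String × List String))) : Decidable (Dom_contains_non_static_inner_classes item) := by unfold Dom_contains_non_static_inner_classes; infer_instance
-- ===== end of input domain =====

-- B replaces A's nested loops (three substring tests per lowercased feature, early return)
-- by joining all lowercased features into one newline-separated blob and running exactly two
-- substring searches on it; same cost, a different decomposition ("alternative").


-- ===== PORT A =====
-- inner loop: 'for indicator in indicators: if indicator in feature_lower: return True'
def pvInnerLoopA (featureLower : String) : List String → Bool
  | [] => false
  | indicator :: rest =>
      if PySem.Str.isIn indicator featureLower then true else pvInnerLoopA featureLower rest

-- outer loop: 'for feature in features: if isinstance(feature, str): …'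
-- (at this type every feature IS a str, so the isinstance guard always passes,
--  and the blanket 'except' can never fire: nothing in the body raises)
def pvOuterLoopA : List String → Bool
  | [] => false
  | feature :: rest =>
      let feature_lower := PySem.Str.lower feature
      if pvInnerLoopA feature_lower ["inner class", "non-static inner", "member inner class"]
      then true else pvOuterLoopA rest

def contains_non_static_inner_classes (item : List (String × List (String × List String))) : Bool :=
  let method := (PySem.Dict.mk item).getD "method" []
  let features := (PySem.Dict.mk method).getD "features" []
  pvOuterLoopA features

-- ===== PORT B =====
-- Source B: blob = "\n".join(f.lower() for f in features if isinstance(f, str))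
-- (the isinstance filter keeps every element at this type)
def contains_non_static_inner_classes_alt (item : List (String × List (String × List String))) : Bool :=
  let features := (PySem.Dict.mk ((PySem.Dict.mk item).getD "method" [])).getD "features" []
  let blob := PySem.Str.join "\n" (features.map PySem.Str.lower)
  PySem.Str.isIn "inner class" blob || PySem.Str.isIn "non-static inner" blob

-- ===== PRECONDITION & SPEC =====
def Spec_contains_non_static_inner_classes (item : List (String × List (String × List String))) (out : Bool) : Prop := out = contains_non_static_inner_classes_alt item
instance (item : List (String × List (String × List String))) (out : Bool) : Decidable (Spec_contains_non_static_inner_classes item out) := by unfold Spec_contains_non_static_inner_classes; infer_instance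

-- ===== CLAIM (what is proved, stated in full; the proofs are below) =====
def Claim_equal_contains_non_static_inner_classes : Prop := ∀ (item : List (String × List (String × List String))), Dom_contains_non_static_inner_classes item → Spec_contains_non_static_inner_classes item (contains_non_static_inner_classes item)

-- ===== LEMMAS AND PROOFS =====

-- a nonempty pattern avoiding c is an infix of x ++ c :: t iff it is an infix of x or of t
lemma pv_infix_append_cons (pat : List Char) (c : Char) (hc : c ∉ pat) (hp : pat ≠ [])
    (x t : List Char) : pat <:+: (x ++ c :: t) ↔ pat <:+: x ∨ pat <:+: t := by
  constructor
  · intro h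
    induction x with
    | nil =>
      rcases List.infix_cons_iff.mp h with hpre | hinf
      · cases pat with
        | nil => exact absurd rfl hp
        | cons a l =>
          rcases List.cons_prefix_cons.mp hpre with ⟨rfl, _⟩
          exact absurd List.mem_cons_self hc
      · exact Or.inr hinf
    | cons a x' ih =>
      rcases List.infix_cons_iff.mp h with hpre | hinf
      · -- pat <+: (a :: x') ++ c :: t
        have hpre' : pat <+: (a :: x') ++ c :: t := hpre
        rcases List.prefix_or_prefix_of_prefix hpre' (List.prefix_append (a :: x') (c :: t)) with
          h1 | h1
        · exact Or.inl h1.isInfix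
        · obtain ⟨r, hr⟩ := h1
          subst hr
          have hr' : r <+: c :: t := ((List.prefix_append_right_inj (a :: x')).mp hpre')
          cases r with
          | nil => exact Or.inl (by simpa using (List.prefix_refl (a :: x')).isInfix)
          | cons b r' =>
            rcases List.cons_prefix_cons.mp hr' with ⟨rfl, _⟩
            exact absurd (by simp) hc
      · rcases ih hinf with h1 | h1
        · exact Or.inl (h1.trans (List.suffix_cons a x').isInfix)
        · exact Or.inr h1
  · rintro (h | h)
    · exact List.infix_append_of_infix_left h
    · exact List.infix_append_of_infix_right (h.trans (List.suffix_cons c t).isInfix)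

-- search in a '\n'-joined list = search in some element (for nonempty '\n'-free patterns)
lemma pv_isIn_join (pat : List Char) (hc : '\n' ∉ pat) (hp : pat ≠ []) (ls : List (List Char)) :
    PySem.Chars.isIn pat (PySem.Chars.join ['\n'] ls) = ls.any (fun s => PySem.Chars.isIn pat s) := by
  induction ls with
  | nil =>
    simp [PySem.Chars.join_nil]
    rw [PySem.Chars.isIn_eq_false_iff]
    intro h
    exact hp (List.eq_nil_of_infix_nil h)
  | cons a rest ih =>
    cases rest with
    | nil => simp [PySem.Chars.join_singleton]
    | cons b r =>
      rw [PySem.Chars.join_cons_cons]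
      rcases Bool.eq_false_or_eq_true (PySem.Chars.isIn pat (a ++ ['\n'] ++ PySem.Chars.join ['\n'] (b :: r))) with h0 | h0 <;>
        rw [h0]
      · rw [PySem.Chars.isIn_iff_infix] at h0
        have h0' : pat <:+: a ++ '\n' :: PySem.Chars.join ['\n'] (b :: r) := by simpa using h0
        rcases (pv_infix_append_cons pat '\n' hc hp _ _).mp h0' with h1 | h1
        · simp [List.any_cons, (PySem.Chars.isIn_iff_infix _ _).mpr h1]
        · rw [← PySem.Chars.isIn_iff_infix, ih] at h1
          simp [List.any_cons, h1]
      · rw [PySem.Chars.isIn_eq_false_iff] at h0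
        have h0' : ¬ pat <:+: a ++ '\n' :: PySem.Chars.join ['\n'] (b :: r) := fun hh => h0 (by simpa using hh)
        rw [pv_infix_append_cons pat '\n' hc hp] at h0'
        obtain ⟨h1, h2⟩ := not_or.mp h0'
        rw [← PySem.Chars.isIn_eq_false_iff] at h1
        have h2' : PySem.Chars.isIn pat (PySem.Chars.join ['\n'] (b :: r)) = false := by
          rw [PySem.Chars.isIn_eq_false_iff]; exact h2
        simp [List.any_cons, h1, ← ih, h2']

-- 'member inner class' is subsumed by 'inner class'
lemma pv_subsumed (s : List Char)
    (h : PySem.Chars.isIn "member inner class".toList s = true) :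
    PySem.Chars.isIn "inner class".toList s = true := by
  rw [PySem.Chars.isIn_iff_infix] at h ⊢
  exact List.IsInfix.trans (by decide) h

-- A's double loop, computed per feature on the list side
lemma pv_outer_eq_any (fs : List String) :
    pvOuterLoopA fs
      = fs.any (fun f =>
          PySem.Chars.isIn "inner class".toList (PySem.Chars.lower f.toList)
          || PySem.Chars.isIn "non-static inner".toList (PySem.Chars.lower f.toList)) := by
  induction fs with
  | nil => rfl
  | cons f rest ih =>
    rw [pvOuterLoopA, List.any_cons, ← ih]
    simp only [pvInnerLoopA, PySem.Str.isIn_eq, PySem.Str.toList_lower]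
    rcases Bool.eq_false_or_eq_true
        (PySem.Chars.isIn "member inner class".toList (PySem.Chars.lower f.toList)) with h3 | h3
    · have := pv_subsumed _ h3
      split_ifs <;> simp_all
    · split_ifs with h1 h2 <;> simp_all

lemma pv_any_or {α : Type} (l : List α) (a b : α → Bool) :
    l.any (fun x => a x || b x) = (l.any a || l.any b) := by
  induction l with
  | nil => rfl
  | cons x xs ih =>
    simp [List.any_cons, ih, Bool.or_assoc, Bool.or_left_comm]

-- ===== VERDICT (by name: the statement is the Claim_ definition above) =====
theorem contains_non_static_inner_classes_spec : Claim_equal_contains_non_static_inner_classes := by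
  intro item _
  unfold Spec_contains_non_static_inner_classes
  unfold contains_non_static_inner_classes contains_non_static_inner_classes_alt
  simp only
  set fs := (PySem.Dict.mk ((PySem.Dict.mk item).getD "method" [])).getD "features" [] with hfs
  rw [pv_outer_eq_any]
  simp only [PySem.Str.isIn_eq, PySem.Str.toList_join]
  have hj : "\n".toList = ['\n'] := by decide
  rw [hj]
  have hm : (fs.map PySem.Str.lower).map String.toList = fs.map (fun f => PySem.Chars.lower f.toList) := by
    simp [Function.comp, PySem.Str.toList_lower]
  rw [hm]
  rw [pv_isIn_join _ (by decide) (by decide), pv_isIn_join _ (by decide) (by decide)]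
  rw [List.any_map, List.any_map, pv_any_or]
  simp [Function.comp_def]
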